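-- pv_equiv track=rewrite | github.com/Niang-jiu/minesweeper | 旋轉門窮舉旗子.py | revolving_door
-- ===== SOURCE A (Python) =====
-- def revolving_door(n, k):
--     if k == 0:
--         return [[]]
--     if n == k:
--         return [list(range(n))]
--
--     res = []
--     res.extend(revolving_door(n-1, k))
--     res.extend([c + [n-1] for c in reversed(revolving_door(n-1, k-1))])
--     return res
-- ===== SOURCE B (Python) =====
-- def revolving_door(n, k):
--     # Bottom-up dynamic programming: row holds, for the current m, the lists
--     # revolving_door(m, j) for j = 0 .. min(m, k); each table cell is computed
--     # exactly once instead of being re-derived by top-down recursion.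
--     if k == 0:
--         return [[]]
--     row = [[[]]]
--     for m in range(1, n + 1):
--         new = [[[]]]
--         for j in range(1, min(m, k) + 1):
--             if j == m:
--                 new.append([list(range(m))])
--             else:
--                 new.append(row[j] + [c + [m - 1] for c in reversed(row[j - 1])])
--         row = new
--     return row[k]
-- ===== Notes on version B (the rewrite author's own statement) =====
-- stated objective: alternative
-- what changed: Replaced A's top-down recursion (which re-derives shared (m,j) subproblems) by an iterative bottom-up DP table row[j] filled for m = 1..n, computing each cell once with no recursion.
-- outside the precondition, e.g. on revolving_door(-2, -2): A returns [[]], B raises IndexError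
import Mathlib
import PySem

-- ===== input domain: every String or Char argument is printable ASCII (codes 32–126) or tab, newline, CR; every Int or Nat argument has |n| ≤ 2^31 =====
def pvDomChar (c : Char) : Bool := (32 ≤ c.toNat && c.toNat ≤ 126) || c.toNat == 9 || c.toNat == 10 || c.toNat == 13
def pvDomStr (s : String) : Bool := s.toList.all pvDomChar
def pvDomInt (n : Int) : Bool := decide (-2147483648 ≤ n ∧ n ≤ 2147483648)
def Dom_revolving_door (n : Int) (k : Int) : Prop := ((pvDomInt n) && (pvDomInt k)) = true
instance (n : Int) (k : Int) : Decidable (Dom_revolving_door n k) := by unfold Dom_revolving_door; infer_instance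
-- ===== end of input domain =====

-- B replaces A's top-down recursion by an iterative bottom-up DP table (row[j] per m = 1..n); equal on 0 ≤ k ∧ (k = 0 ∨ k ≤ n).

-- ===== PORT A =====
-- literal transliteration of A's recursion; the fuel only makes it total (inside
-- Pre_ the recursion depth is at most n, so n.toNat + 1 fuel is never exhausted — proved below)
def revolving_door_fuel : Nat → Int → Int → List (List Int)
  | 0, _, _ => []
  | f+1, n, k =>
    if k = 0 then [[]]
    else if n = k then [PySem.List.pyRange 0 n 1]
    else revolving_door_fuel f (n-1) k
         ++ (revolving_door_fuel f (n-1) (k-1)).reverse.map (fun c => c ++ [n-1])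

def revolving_door (n : Int) (k : Int) : List (List Int) :=
  revolving_door_fuel (n.toNat + 1) n k

-- ===== PORT B =====
-- transliteration of Source B; every row/new index read (j, j-1 with 1 ≤ j ≤ min(m,k), j ≠ m)
-- is in range whenever the Python returns, so the pyGetD defaults are exact; the final
-- row[k] is PySem.List.pyGetD, Python-exact including negative k
def revolving_door_alt (n : Int) (k : Int) : List (List Int) :=
  if k = 0 then [[]]
  else
    let row := (PySem.List.pyRange 1 (n + 1) 1).foldl (fun row m =>
      (PySem.List.pyRange 1 (min m k + 1) 1).foldl (fun new j =>
        if j = m then new ++ [[PySem.List.pyRange 0 m 1]]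
        else new ++ [PySem.List.pyGetD row j []
          ++ (PySem.List.pyGetD row (j - 1) []).reverse.map (fun c => c ++ [m - 1])])
        [[[]]]) [[[]]]
    PySem.List.pyGetD row k []

-- ===== PRECONDITION & SPEC =====
-- Pre_ excludes k < 0 and 0 ≤ k > n with k ≠ 0: there A's recursion never reaches a base
-- case and raises RecursionError — except at the degenerate n = k < 0, where A returns
-- [[]] via an empty range() and B's table indexing raises IndexError instead.
def Pre_revolving_door (n : Int) (k : Int) : Prop := 0 ≤ k ∧ (k = 0 ∨ k ≤ n)
instance (n : Int) (k : Int) : Decidable (Pre_revolving_door n k) := by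
  unfold Pre_revolving_door; infer_instance

def pvWitness_revolving_door : Int × Int := (4, 2)

def Spec_revolving_door (n : Int) (k : Int) (out : List (List Int)) : Prop := out = revolving_door_alt n k
instance (n : Int) (k : Int) (out : List (List Int)) : Decidable (Spec_revolving_door n k out) := by unfold Spec_revolving_door; infer_instance

-- ===== CLAIM (what is proved, stated in full; the proofs are below) =====
def Claim_equal_revolving_door : Prop := ∀ (n : Int) (k : Int), Dom_revolving_door n k → Pre_revolving_door n k → Spec_revolving_door n k (revolving_door n k)

-- ===== LEMMAS AND PROOFS =====

-- the common value of both programs, as a structural recursion over Nat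
def rdSpec : Nat → Nat → List (List Int)
  | _, 0 => [[]]
  | 0, _+1 => []
  | m+1, j+1 =>
    if m + 1 = j + 1 then [PySem.List.pyRange 0 ((m : Int) + 1) 1]
    else rdSpec m (j+1) ++ (rdSpec m j).reverse.map (fun c => c ++ [(m : Int)])

lemma rdSpec_zero (m : Nat) : rdSpec m 0 = [[]] := by cases m <;> rfl

lemma rdSpec_self (m : Nat) (h : 1 ≤ m) :
    rdSpec m m = [PySem.List.pyRange 0 (m : Int) 1] := by
  obtain ⟨m', rfl⟩ : ∃ m', m = m' + 1 := ⟨m - 1, by omega⟩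
  simp [rdSpec]

lemma rdSpec_step (m j : Nat) (h : j + 1 < m + 1) :
    rdSpec (m+1) (j+1) = rdSpec m (j+1) ++ (rdSpec m j).reverse.map (fun c => c ++ [(m : Int)]) := by
  simp [rdSpec]
  intro h'; omega

-- A's recursion computes rdSpec whenever the fuel exceeds n
lemma fuel_eq_rdSpec : ∀ (f N K : Nat), K ≤ N → N < f →
    revolving_door_fuel f (N : Int) (K : Int) = rdSpec N K := by
  intro f
  induction f with
  | zero => intro N K _ h; omega
  | succ f ih =>
    intro N K hKN hNf
    cases K with
    | zero => simp [revolving_door_fuel, rdSpec_zero]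
    | succ j =>
      obtain ⟨m, rfl⟩ : ∃ m, N = m + 1 := ⟨N - 1, by omega⟩
      by_cases hNK : m + 1 = j + 1
      · rw [← hNK]
        simp only [revolving_door_fuel]
        rw [if_neg (by push_cast; omega), if_true]
        rw [rdSpec_self (m+1) (by omega)]
      · simp only [revolving_door_fuel]
        rw [if_neg (by push_cast; omega), if_neg (by intro h; exact hNK (by exact_mod_cast h))]
        have h1 := ih m (j+1) (by omega) (by omega)
        have h2 := ih m j (by omega) (by omega)
        push_cast at h1 h2 ⊢
        simp only [add_sub_cancel_right]
        rw [h1, h2, rdSpec_step m j (by omega)]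

-- === B side ===

-- the DP row after the outer loop has processed m = 1 .. M
def rowAt (K M : Nat) : List (List (List Int)) :=
  (List.range (min M K + 1)).map (fun j => rdSpec M j)

-- one inner-loop pass builds the level-M row from the level-(M-1) row
lemma inner_loop (K M : Nat) (hM : 1 ≤ M) : ∀ (t : Nat), t ≤ min M K →
    (PySem.List.pyRange 1 ((t : Int) + 1) 1).foldl (fun new j =>
      if j = (M : Int) then new ++ [[PySem.List.pyRange 0 (M : Int) 1]]
      else new ++ [PySem.List.pyGetD (rowAt K (M - 1)) j []
        ++ (PySem.List.pyGetD (rowAt K (M - 1)) (j - 1) []).reverse.map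
            (fun c => c ++ [(M : Int) - 1])])
      [[[]]] = (List.range (t + 1)).map (fun j => rdSpec M j) := by
  intro t
  induction t with
  | zero => norm_num [PySem.List.pyRange, rdSpec_zero]
  | succ t ih =>
    intro ht
    rw [show ((t + 1 : Nat) : Int) + 1 = ((t : Int) + 1) + 1 from by push_cast; ring,
        PySem.List.pyRange_one_succ_right (by omega), List.foldl_append, ih (by omega),
        List.foldl_cons, List.foldl_nil, List.range_succ (n := t + 1), List.map_append, List.map_singleton]
    by_cases hm : t + 1 = M
    · rw [if_pos (by exact_mod_cast congrArg Nat.cast hm), hm, rdSpec_self M (by omega)]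
    · have htM : t + 1 < M := by omega
      rw [if_neg (by intro h; exact hm (by exact_mod_cast h))]
      have e1 : (t : Int) + 1 - 1 = ((t : Nat) : Int) := by ring
      have ecast : (t : Int) + 1 = ((t + 1 : Nat) : Int) := by push_cast; ring
      unfold rowAt
      rw [e1, ecast, PySem.List.pyGetD_natCast, PySem.List.pyGetD_natCast,
          PySem.List.getD_map_range _ _ _ _ (by omega),
          PySem.List.getD_map_range _ _ _ _ (by omega)]
      have hrw := rdSpec_step (M - 1) t (by omega)
      have eM : M - 1 + 1 = M := by omega
      have eMc : ((M - 1 : Nat) : Int) = (M : Int) - 1 := by omega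
      rw [eM, eMc] at hrw
      rw [hrw]

-- the outer loop over m = 1 .. N
lemma outer_loop (K N : Nat) :
    (PySem.List.pyRange 1 ((N : Int) + 1) 1).foldl (fun row m =>
      (PySem.List.pyRange 1 (min m (K : Int) + 1) 1).foldl (fun new j =>
        if j = m then new ++ [[PySem.List.pyRange 0 m 1]]
        else new ++ [PySem.List.pyGetD row j []
          ++ (PySem.List.pyGetD row (j - 1) []).reverse.map (fun c => c ++ [m - 1])])
        [[[]]]) [[[]]] = rowAt K N := by
  induction N with
  | zero => norm_num [PySem.List.pyRange, rowAt, rdSpec_zero]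
  | succ N ih =>
    rw [show ((N + 1 : Nat) : Int) + 1 = ((N : Int) + 1) + 1 from by push_cast; ring,
        PySem.List.pyRange_one_succ_right (by omega), List.foldl_append, ih, List.foldl_cons,
        List.foldl_nil]
    rw [show (N : Int) + 1 = ((N + 1 : Nat) : Int) from by push_cast; ring,
        show min ((N + 1 : Nat) : Int) (K : Int) = ((min (N + 1) K : Nat) : Int) from by
          rw [Nat.cast_min],
        show rowAt K N = rowAt K ((N + 1) - 1) from by norm_num]
    rw [inner_loop K (N + 1) (by omega) (min (N + 1) K) le_rfl]
    unfold rowAt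
    rfl

lemma alt_eq_rdSpec (N K : Nat) (hK : 1 ≤ K) (hKN : K ≤ N) :
    revolving_door_alt (N : Int) (K : Int) = rdSpec N K := by
  unfold revolving_door_alt
  rw [if_neg (by exact_mod_cast by omega : ¬ ((K : Int) = 0))]
  dsimp only
  rw [outer_loop K N]
  unfold rowAt
  rw [PySem.List.pyGetD_natCast, PySem.List.getD_map_range _ _ _ _ (by omega)]

-- ===== VERDICT (by name: the statement is the Claim_ definition above) =====
theorem revolving_door_spec : Claim_equal_revolving_door := by
  intro n k _ hpre
  obtain ⟨hk, hcase⟩ := hpre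
  unfold Spec_revolving_door
  rcases hcase with rfl | hkn
  · simp [revolving_door, revolving_door_fuel, revolving_door_alt]
  · by_cases hk0 : k = 0
    · subst hk0; simp [revolving_door, revolving_door_fuel, revolving_door_alt]
    · have hk1 : 1 ≤ k := by omega
      have hn : 0 ≤ n := le_trans hk hkn
      have hnn : n = ((n.toNat : Nat) : Int) := by omega
      have hkk : k = ((k.toNat : Nat) : Int) := by omega
      rw [revolving_door, hnn, hkk]
      simp only [Int.toNat_natCast]
      rw [fuel_eq_rdSpec (n.toNat + 1) n.toNat k.toNat (by omega) (by omega),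
          alt_eq_rdSpec n.toNat k.toNat (by omega) (by omega)]
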